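/- GENERATED by mk_final_copies.py from the proof of the farm's unit `start_decoder.R7a` (farm:start_decoder.R7a.1: Proof.lean) as the
   re-elaboration sweep compiled it — do not edit. -/
/-
  Unit `start_decoder.R7a`: segment R7a of `start_decoder` (0x115db9 – 0x115e37, stb_vorbis_fixed.c 4079 – 4082): the test of loop
  4079 (`j < f->codebooks[r->classbook].entries`, three check sites); not taken: `r14d = i + 1`, the head of loop 4043
  (`AtR2 (i + 1)`); taken: `classwords = cb.dimensions`, `&r->classdata[j]` (two more check sites), `setup_malloc(f, classwords)`,
  exit at its return (`AtR7Row`).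

  The logic (what the footprint keeps, the two exits, the check sites, the loaded values) is in Lemmas.lean; here: ONE walk
  (29 instructions, five check calls, one contract call) and the two exits.
-/
import Asan.CheckWalk
import Vorbis.Spec.Reader
import Vorbis.Spec.Units.start_decoder_R7a
import Vorbis.Spec.Worked.start_decoder_R7a_Lemmas

open X86 X86.User Asan Vorbis Vorbis.Spec Vorbis.Spec.StartDecoder

set_option maxRecDepth 4000
set_option maxHeartbeats 4000000

namespace Vorbis.Spec.start_decoder_R7a

/-- **The walk of segment R7a** from the head of loop 4079 (`BodyR7J`): the five loaded values are named first (`load_*`,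
`where_`), so that every address of the walk speaks of `r`, `cb`, `cd`, `W`, `E`; the check sites are closed object-level
(`check_f`, `check_rec`, `check_cb`); exit 0x115dfd → `exit_head`; the return of `setup_malloc` (0x115e3c) → `SecPt.alloc_call` /
`SecPt.alloc_fail` for the point, `exit_row` for the rest. -/
theorem walk_all {Lay : Layout} (hLay : Lay.hi = 0x1000000) {μ : Microarch} (hμ : UserX.MicroOK μ) {u₀ : State}
    (hcode : HasCodeNat Lay u₀ Vorbis.L.start_decoder.entry Vorbis.Code.code_start_decoder.nat Vorbis.L.start_decoder.size)
    (h_ld8 : Asan.SmallCheck Lay μ Vorbis.WayInv (Vorbis.CodeOK u₀) [.rax, .rcx, .rdx] 8 Vorbis.L.__asan_load8_noabort.entry)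
    (h_ld1 : Asan.SmallCheck Lay μ Vorbis.WayInv (Vorbis.CodeOK u₀) [.rax, .rdx] 1 Vorbis.L.__asan_load1_noabort.entry)
    (h_ld4 : Asan.SmallCheck Lay μ Vorbis.WayInv (Vorbis.CodeOK u₀) [.rax, .rcx, .rdx] 4 Vorbis.L.__asan_load4_noabort.entry)
    (h_sm : ∀ (others : List Obj) (frames : List (Nat × FrameLayout)) (A : Arena), Calls Lay μ Vorbis.WayInv (Vorbis.conv u₀) Vorbis.L.setup_malloc.entry (Vorbis.Spec.setup_malloc.spec others frames A))
    {g : Ghost} {i j E : Nat} {A6 A6c Ai Ak Ad : Arena} {A : Arena × List Obj} {v : State}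
    (hb : BodyR7J u₀ g i j E A6 A6c Ai Ak Ad A v) :
    ReachVia Lay μ WayInv v (fun w => AtR2 u₀ g (i + 1) w ∨ AtR7Row u₀ g i j E w) := by
  have hloop := hb.loop
  have hfr := hloop.frame
  have hh := hloop.hand
  have hm := hloop.mid
  have hp : Pos g A := Pos.of_mid hfr hh hm
  have he := hfr.entry
  v_entry he
  obtain ⟨hRa, hR8⟩ := hfr.r_eq
  simp only [steady, Ghost.RA] at hRa
  simp only [depth] at he_room he_stack
  have hflo := hp.f_lo
  have hf2 := hp.f_hi
  have hf3 := hp.f_stack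
  simp only [Ghost.RA] at hf3
  have har1 := hp.ar_lo
  have har2 := hp.ar_hi
  have har3 := hp.ar_stack
  have hRn : (addr g.R).toNat = g.R := toNat_addr _ (by omega)
  have hfn : (addr g.f).toNat = g.f := toNat_addr _ (by omega)
  have w_rip := hfr.rip
  have c_rsp := hfr.rsp
  have c_rbp := hb.rbp
  have w_eq : Mem.EqOn Vorbis.L.textLo Vorbis.L.textHi u₀.mem v.mem := hfr.code
  have hdf : v.flags .df = false := (show abiInv _ from hfr.inv).1
  have hmx : v.mxcsr &&& 0x1F80 = 0x1F80 := (show abiInv _ from hfr.inv).2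
  have hsse := Vorbis.sseOK_of_abiInv hfr.inv
  -- the values the segment loads, named; where record `i` and its class book are
  obtain ⟨⟨hw1, hw2⟩, hw3, hw4⟩ := where_ hb
  obtain ⟨l3, hE24⟩ := load_entries hb
  obtain ⟨l4, hW1, hW2⟩ := load_dims hb
  have hjE := hb.j_le
  have hj31 : j < 2 ^ 31 := by omega
  obtain ⟨r, hr⟩ : ∃ r, resAt g v.mem i = r := ⟨_, rfl⟩
  rw [hr] at hw1 hw2 hw3 hw4 l3 l4 hW1 hW2
  obtain ⟨ecb, hcbn⟩ := cbk_eq v.mem g.f r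
  have l1 := load_codebooks v.mem g.f
  have l2 := load_classbook v.mem r
  have l5 := load_classdata v.mem r
  obtain ⟨cbs, hcbs⟩ : ∃ x, stb_vorbis.codebooks v.mem g.f = x := ⟨_, rfl⟩
  obtain ⟨cbn, hcbnE⟩ : ∃ x, Residue.classbook v.mem r = x := ⟨_, rfl⟩
  obtain ⟨cb, hcb⟩ : ∃ x, Residue.cbk v.mem g.f r = x := ⟨_, rfl⟩
  obtain ⟨W, hW⟩ : ∃ x, Residue.W v.mem g.f r = x := ⟨_, rfl⟩
  obtain ⟨cd, hcd⟩ : ∃ x, Residue.classdata v.mem r = x := ⟨_, rfl⟩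
  rw [hcbs] at l1 ecb
  rw [hcbnE] at l2 ecb hcbn
  rw [hcb] at ecb l3 l4 hw3 hw4
  rw [hW] at l4 hW1 hW2
  rw [hcd] at l5
  have hrn : (addr r).toNat = r := toNat_addr _ (by omega)
  have hcbnat : (addr cb).toNat = cb := toNat_addr _ (by omega)
  have c_rbx : v.reg .rbx = addr r := by
    rw [← hr]
    exact hb.rbx
  have c_r13 : v.reg .r13 = UInt64.ofNat j := hb.r13
  have h1 := hloop.res.R1
  have hlt := hb.cur.lt
  have hi64 : i < 64 := by omega
  have l6 : v.mem.readLE (addr g.R + 56) 4 = i := by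
    have hc := hb.cnt
    unfold StartDecoder.slot at hc
    rw [← hc]
    simp only [vfield]
  have hsm := h_sm A.2 g.frames' A.1
  -- 0x115db9 (loop31 = cut265), stb_vorbis_fixed.c:4079: the walk to cut235 (0x115982) or to the return of setup_malloc (cut266)
  u_walk hcode [hμ.vendor, zx8 cbn hcbn, cb_word cbs cbn cb ecb (by omega), cnt32_sext j hj31, cnt32_part j, cnt32_sext_bv j hj31, cnt32_ofBV W (by omega)] until [Vorbis.L.start_decoder.cut235, Vorbis.L.start_decoder.cut266] span [Vorbis.L.textLo, Vorbis.L.textHi] side (v_side)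
  case check_115dc0 =>
    -- 0x115dc0, line 4079: load8 of `f->codebooks` (`f + 0a8H`, inside `*f`)
    have hun : ShadowUntouched v.mem s_115dc0.mem := by v_untouched
    exact check_f hb hun _ 168 8 (by u_omega) (by decide) (by decide)
  case check_115dd0 =>
    -- 0x115dd0, line 4079: load1 of `r->classbook` (`r + 0dH`, inside the `residue_config` block)
    have hun : ShadowUntouched v.mem s_115dd0.mem := by v_untouched
    refine check_rec hb hun _ 13 1 ?_ (by decide) (by decide)
    rw [hr]
    u_omega
  case check_115de8 =>
    -- 0x115de8, line 4079: load4 of `cb.entries` (`cb + 4`, inside the codebooks block: R7)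
    have hun : ShadowUntouched v.mem s_115de8.mem := by v_untouched
    refine check_cb hb hun _ 4 4 ?_ (by decide) (by decide)
    rw [hr, hcb]
    u_omega
  case check_115e05 =>
    -- 0x115e05, line 4080: load4 of `cb.dimensions` (`cb`)
    have hun : ShadowUntouched v.mem s_115e05.mem := by v_untouched
    refine check_cb hb hun _ 0 4 ?_ (by decide) (by decide)
    rw [hr, hcb]
    u_omega
  case check_115e1a =>
    -- 0x115e1a, line 4082: load8 of `r->classdata` (`r + 10H`)
    have hun : ShadowUntouched v.mem s_115e1a.mem := by v_untouched
    refine check_rec hb hun _ 16 8 ?_ (by decide) (by decide)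
    rw [hr]
    u_omega
  case call_inv => v_inv
  case pre_115e37 =>
    -- 0x115e37, line 4082: `ArenaPre` of `setup_malloc(f, classwords)`
    have hun : ShadowUntouched v.mem s_115e37.mem := by v_untouched
    have hs : Mem.SameExcept [⟨g.R - 8, g.R⟩, ⟨g.R + 48, g.R + 56⟩] v.mem s_115e37.mem := by u_same
    have htop : (s_115e37.reg .rsp).toNat + 8 = g.R := by
      rw [w_rsp]
      u_omega
    have hfin : g.f + Off.sizeof.stb_vorbis ≤ 2 ^ 64 := by
      simp only [Off.sizeof.stb_vorbis]
      omega
    refine ⟨shadowPre_call hfr htop hun, ?_, ?_, hh.arenaText⟩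
    · -- `*f` is live
      rw [w_rdi, hfn]
      exact (hh.obj.mono (frames'_sub g A.2)).blockLive
    · -- the arena layer: AR5's fields of `*f` are off the push and the spill
      rw [w_rdi, hfn]
      apply hm.arena.frame hfin
      apply hs.eqOn
      intro w hw
      simp only [List.mem_cons, List.mem_nil_iff, or_false] at hw
      rcases hw with rfl | rfl
      · simp only [voff]
        omega
      · simp only [voff]
        omega
  · -- 0x115e3c, the return of `setup_malloc(f, classwords)`: the facts about the call state `s_115e37`
    have hjlt : j < E := by
      rw [cnt32_toInt j hj31, cnt32_toInt E (by omega)] at hbr_115df2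
      omega
    have hsp : (s_115e37.reg .rsp).toNat + 8 = g.R := by
      rw [w_rsp_115e37]
      u_omega
    have hrdi : (s_115e37.reg .rdi).toNat = g.f := by
      rw [w_rdi_115e37]
      exact hfn
    have hn : (s_115e37.reg .rsi).toNat % 2 ^ 32 = W := by
      rw [w_rsi_115e37, cnt32_part, cnt32_ofBV W (by omega), UInt64.toNat_ofNat']
      omega
    -- `Frame`'s and `Mid`'s memory parts at the call state: the spill `[R + 30H]` and the pushed return addresses
    have hun0 : ShadowUntouched v.mem s_115e37.mem := by v_untouched
    have hs0 : Mem.SameExcept [⟨g.R - 8, g.R⟩, ⟨g.R + 48, g.R + 56⟩] v.mem s_115e37.mem := by u_same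
    have hws0 : ∀ w, w ∈ [(⟨g.R - 8, g.R⟩ : Span), ⟨g.R + 48, g.R + 56⟩] → MidWin g 6 7 A6 A w := by
      intro w hw
      simp only [List.mem_cons, List.mem_nil_iff, or_false] at hw
      unfold MidWin
      rcases hw with rfl | rfl
      · left
        simp only []
        omega
      · right
        left
        simp only []
        omega
    have hbits0 : Bits (g.Blk A) g.len s_115e37.mem g.f := by
      apply bits_kept hp hm.bits hs0
      intro w hw
      simp only [List.mem_cons, List.mem_nil_iff, or_false] at hw
      left
      rcases hw with rfl | rfl
      · simp only []
        omega
      · simp only []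
        omega
    have hf1 : FInv g A s_115e37.mem := (FInv.of hfr).carry hp hs0 hun0 (fun w hw => (hws0 w hw).secWin)
    have hm1 : Mid g 6 6 7 A6 A s_115e37.mem := hm.carry hp hs0 hun0 hws0 hbits0
    -- the callee's footprint, in the callee's terms
    have hsame := w_same
    simp only [X86.User.Spec.footprint, vspec] at hsame
    have hpost := w_post
    have hcodeOK : CodeOK u₀ s_115e37r.mem := Vorbis.conv_code_eqOn w_code
    have hrbp : s_115e37r.reg .rbp = addr g.f := by
      rw [w_kept .rbp rfl]
      exact c_rbp
    -- the registers of the exit assertion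
    have hr14 : s_115e37r.reg .r14 = addr (8 * j) := by
      rw [w_r14]
      exact mul8_word j
    have hr12 : s_115e37r.reg .r12 = addr (Residue.classdata v.mem (resAt g v.mem i) + 8 * j) := by
      rw [w_r12, hr, hcd]
      exact elem8_word j cd
    have hr15 : s_115e37r.reg .r15 = addr (Residue.W v.mem g.f (resAt g v.mem i)) := by
      rw [w_r15, hr, hW, cnt32_ofBV W (by omega)]
      rfl
    -- the spilled `&r->classdata` at the call state
    have h30s : s_115e37.mem.readLE (addr g.R + 48) 8 = (addr r + 16).toNat := by
      rw [w_mem_115e37]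
      u_read
    rw [w_mem_115e37] at h30s
    have ea : (addr r + 16).toNat = r + 16 := by u_omega
    by_cases hfit : A.1.Fits ((s_115e37.reg .rsi).toNat % 2 ^ 32)
    · -- the row was allocated: the ghost grows, `Since A.1 …`
      obtain ⟨hpt', hrax, _, hsince⟩ :=
        SecPt.alloc_call hfr hh hp hf1 hm1 hsp hrdi hsame hpost hfit w_rip w_rsp hcodeOK w_inv hrbp
      rw [hn] at hpt' hsince hfit
      have hshw := shadow_win_of_fits hm.arena hfit
      -- ONE footprint from the segment's entry to the returned state
      simp only [X86.User.Spec.footprint, vspec, w_rsp_115e37] at w_same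
      rw [w_mem_115e37] at w_same
      simp only [w_rdi_115e37, hfn, hn] at w_same
      have h30r : s_115e37r.mem.readLE (addr g.R + 48) 8 = (addr r + 16).toNat := by
        u_frame h30s
      have hall : Mem.SameExcept
          [⟨g.R - 88, g.R⟩, ⟨g.R + 48, g.R + 56⟩, ⟨g.f + 8, g.f + 12⟩, ⟨g.f + 128, g.f + 132⟩,
           shadowSpan (A.1.B + A.1.S + 32) (A.1.B + A.1.S + 32 + W)] v.mem s_115e37r.mem := by
        u_same
      refine ReachVia.done (Or.inr (exit_row hb hjlt hpt' ⟨Or.inr ⟨by omega, ?_, ?_⟩⟩ hall ?_ (w_kept .rbx rfl)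
        (w_kept .r13 rfl) hr14 hr12 hr15 ?_))
      · rw [hr, hW]
      · rw [hr, hW]
        exact hsince
      · intro x hx
        simp only [List.mem_cons, List.mem_nil_iff, or_false] at hx
        unfold QuietWin
        rcases hx with rfl | rfl | rfl | rfl | rfl
        · left
          simp only []
          omega
        · right
          left
          simp only []
          omega
        · right
          right
          left
          simp only []
          omega
        · right
          right
          right
          left
          simp only []
          omega
        · right
          right
          right
          right
          omega
      · rw [hr]
        unfold Mem.u64
        rw [← addr_add_lit, h30r, ea]
    · -- the request did not fit: NULL, the same ghost (the failure clause of the callee's post)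
      obtain ⟨hrax, harena', hunp, hfail⟩ := hpost.2 hfit
      obtain ⟨hpt', _⟩ :=
        SecPt.alloc_fail hfr hh hp hf1 hm1 hsp hrdi harena' hunp hfail w_rip w_rsp hcodeOK w_inv hrbp
      simp only [w_rsp_115e37, w_rdi_115e37, hfn] at hfail
      rw [w_mem_115e37] at hfail
      clear w_same
      have w_same := hfail
      have h30r : s_115e37r.mem.readLE (addr g.R + 48) 8 = (addr r + 16).toNat := by
        u_frame h30s
      have hall : Mem.SameExcept
          [⟨g.R - 88, g.R⟩, ⟨g.R + 48, g.R + 56⟩, ⟨g.f + 8, g.f + 12⟩] v.mem s_115e37r.mem := by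
        u_same
      refine ReachVia.done (Or.inr (exit_row hb hjlt hpt' ⟨Or.inl ⟨hrax, rfl⟩⟩ hall ?_ (w_kept .rbx rfl)
        (w_kept .r13 rfl) hr14 hr12 hr15 ?_))
      · intro x hx
        simp only [List.mem_cons, List.mem_nil_iff, or_false] at hx
        unfold QuietWin
        rcases hx with rfl | rfl | rfl
        · left
          simp only []
          omega
        · right
          left
          simp only []
          omega
        · right
          right
          left
          simp only []
          omega
      · rw [hr]
        unfold Mem.u64
        rw [← addr_add_lit, h30r, ea]
  · -- 0x115df4: `E ≤ j`, the rows are complete: `r14d = i + 1`, to the head of loop 4043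
    have hEj : E ≤ j := by
      rw [cnt32_toInt j hj31, cnt32_toInt E (by omega)] at hbr_115df2
      omega
    have hs : Mem.SameExcept [⟨g.R - 8, g.R⟩] v.mem s_115dfd.mem := by u_same
    have hun : ShadowUntouched v.mem s_115dfd.mem := by v_untouched
    have hinv : abiInv s_115dfd := by v_inv
    refine ReachVia.done (Or.inl (exit_head hb hEj hs hun ?_ w_rip w_rsp w_eq hinv (w_kept .rbp rfl) ?_))
    · intro x hx
      simp only [List.mem_singleton] at hx
      subst hx
      simp only []
      omega
    · rw [w_r14, cnt32_succ_bv, cnt32_ofBV (i + 1) (by omega)]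
      rfl

end Vorbis.Spec.start_decoder_R7a

/-- **Segment R7a of `start_decoder`** (0x115db9 → 0x115982 ∨ 0x115e3c): `walk_all` at every entry state. -/
theorem Vorbis.Spec.Worked.start_decoder_R7a_ok : Vorbis.Spec.start_decoder_R7a.Statement := by
  unfold Vorbis.Spec.start_decoder_R7a.Statement
  intro Lay hLay μ hμ u₀ hcode h_ld8 h_ld1 h_ld4 h_sm
  intro g i j E v hat
  obtain ⟨A6, A6c, Ai, Ak, Ad, A, hb⟩ := hat
  exact Vorbis.Spec.start_decoder_R7a.walk_all hLay hμ hcode h_ld8 h_ld1 h_ld4 h_sm hb
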